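-- pv_equiv track=rewrite | github.com/jiajunma/unirepn | combunipotent/tool.py | springer_part2repn
-- ===== SOURCE A (Python) =====
-- def part_trans(part, reverse=True):
--     part=sorted([x for x in part if x>0])
--     if len(part) == 0:
--         return []
--     else:
--         tpart = []
--         for i in range(part[-1]):
--             ri  = len([x for x in part if x>i])
--             tpart.append(ri)
--         return sorted(tpart, reverse=reverse)
--
-- def springer_part2repn(part, rtype='C', partrc='r' ):
--     if partrc == 'c':
--         part = part_trans(part)
--     part = sorted(part)
--     if (rtype == 'C' and len(part)%2 == 1) or \
--        (rtype == 'B' and len(part)%2 == 0) or \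
--        (rtype == 'D' and len(part)%2 == 1):
--            part.insert(0, 0)
--     pp = [lam+i for i, lam in enumerate(part)]
--     pe, po = [],[]
--     for lam in pp:
--         if lam % 2 == 1:
--             po.append(lam//2)
--         else:
--             pe.append(lam//2)
--     tauL = tuple(xis - i for i, xis in enumerate(po))
--     tauR = tuple(eta - i for i, eta in enumerate(pe))
--     return (tauL,tauR)
-- ===== SOURCE B (Python) =====
-- def _conj_desc(part):
--     # conjugate partition, largest first, via counting
--     pos = [x for x in part if x > 0]
--     if not pos:
--         return []
--     mx = max(pos)
--     cnt = {}
--     for x in pos: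
--         cnt[x] = cnt.get(x, 0) + 1
--     acc = 0
--     res = []
--     for i in range(mx - 1, -1, -1):
--         acc += cnt.get(i + 1, 0)
--         res.append(acc)
--     return res[::-1]
--
-- def springer_part2repn(part, rtype='C', partrc='r'):
--     if partrc == 'c':
--         part = _conj_desc(part)
--     part = sorted(part)
--     pad = (len(part) % 2 == 0) if rtype == 'B' else (len(part) % 2 == 1 and rtype in ('C', 'D'))
--     if pad:
--         part = [0] + part
--     tauL, tauR = [], []
--     io = ie = 0
--     for i, lam in enumerate(part):
--         v = lam + i
--         if v % 2 == 1:
--             tauL.append(v // 2 - io)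
--             io += 1
--         else:
--             tauR.append(v // 2 - ie)
--             ie += 1
--     return (tuple(tauL), tuple(tauR))
-- ===== Notes on version B (the rewrite author's own statement) =====
-- stated objective: alternative
-- what changed: The conjugate-partition helper is computed by one counting pass over a dict plus one cumulative countdown sweep instead of rescanning the whole list once per index up to the maximum, and the main body fuses A's three passes (build pp, split into pe/po, subtract indices) into a single enumerate loop with two running counters.
import Mathlib
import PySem

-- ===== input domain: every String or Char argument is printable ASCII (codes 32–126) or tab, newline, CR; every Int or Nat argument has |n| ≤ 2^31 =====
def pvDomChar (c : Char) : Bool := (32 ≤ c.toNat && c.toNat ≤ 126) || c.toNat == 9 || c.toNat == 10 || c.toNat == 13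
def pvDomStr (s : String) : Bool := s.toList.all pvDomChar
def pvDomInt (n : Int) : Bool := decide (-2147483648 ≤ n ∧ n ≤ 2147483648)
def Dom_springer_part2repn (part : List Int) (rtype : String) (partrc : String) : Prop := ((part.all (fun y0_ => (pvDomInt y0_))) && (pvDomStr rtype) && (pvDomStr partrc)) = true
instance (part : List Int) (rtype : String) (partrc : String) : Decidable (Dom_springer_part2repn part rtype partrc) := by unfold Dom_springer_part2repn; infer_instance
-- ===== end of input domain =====

-- B computes the conjugate partition by a counting pass over a dict plus one cumulative countdown sweep
-- (instead of part_trans's per-index rescans) and fuses A's three main-body passes into one enumerate loop.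


-- ===== PORT A =====
def pvPartTrans (part : List Int) : List Int :=
  let sp := PySem.List.sorted (part.filter (fun x => decide (0 < x))) (fun x => x) false
  if sp.length == 0 then []
  else
    let last := (PySem.List.pyGet? sp (-1)).getD 0
    let tpart := (PySem.List.pyRange 0 last 1).foldl
      (fun acc i => acc ++ [((sp.filter (fun x => decide (i < x))).length : Int)]) []
    PySem.List.sorted tpart (fun x => x) true

def springer_part2repn (part : List Int) (rtype : String) (partrc : String) : List Int × List Int :=
  let part1 := if partrc == "c" then pvPartTrans part else part
  let part2 := PySem.List.sorted part1 (fun x => x) false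
  let part3 :=
    if (rtype == "C" && part2.length % 2 == 1) || (rtype == "B" && part2.length % 2 == 0) ||
       (rtype == "D" && part2.length % 2 == 1) then PySem.List.insert part2 0 0 else part2
  let pp := (PySem.List.enumerate part3).map (fun p => p.2 + p.1)
  let s := pp.foldl
    (fun (s : List Int × List Int) lam =>
      if PySem.Int.mod lam 2 == 1 then (s.1, s.2 ++ [PySem.Int.floordiv lam 2])
      else (s.1 ++ [PySem.Int.floordiv lam 2], s.2)) ([], [])
  let tauL := (PySem.List.enumerate s.2).map (fun p => p.2 - p.1)
  let tauR := (PySem.List.enumerate s.1).map (fun p => p.2 - p.1)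
  (tauL, tauR)

-- ===== PORT B =====
def pvConjDesc (part : List Int) : List Int :=
  let pos := part.filter (fun x => decide (0 < x))
  if pos.isEmpty then []
  else
    let mx := (PySem.List.max? pos (fun x => x)).getD 0
    let cnt := pos.foldl (fun (d : PySem.Dict Int Int) x => d.insert x (d.getD x 0 + 1)) PySem.Dict.empty
    let s := (PySem.List.pyRange (mx - 1) (-1) (-1)).foldl
      (fun (s : Int × List Int) i =>
        let a := s.1 + cnt.getD (i + 1) 0
        (a, s.2 ++ [a])) (0, [])
    (PySem.List.slice? s.2 none none (-1)).getD []

def springer_part2repn_alt (part : List Int) (rtype : String) (partrc : String) : List Int × List Int :=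
  let part1 := if partrc == "c" then pvConjDesc part else part
  let part2 := PySem.List.sorted part1 (fun x => x) false
  let pad := if rtype == "B" then part2.length % 2 == 0
             else (part2.length % 2 == 1 && (rtype == "C" || rtype == "D"))
  let part3 := if pad then 0 :: part2 else part2
  let s := (PySem.List.enumerate part3).foldl
    (fun (s : (List Int × List Int) × (Int × Int)) p =>
      let v := p.2 + p.1
      if PySem.Int.mod v 2 == 1 then
        ((s.1.1 ++ [PySem.Int.floordiv v 2 - s.2.1], s.1.2), (s.2.1 + 1, s.2.2))
      else
        ((s.1.1, s.1.2 ++ [PySem.Int.floordiv v 2 - s.2.2]), (s.2.1, s.2.2 + 1)))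
    (([], []), (0, 0))
  (s.1.1, s.1.2)

-- ===== PRECONDITION & SPEC =====
def Spec_springer_part2repn (part : List Int) (rtype : String) (partrc : String) (out : List Int × List Int) : Prop := out = springer_part2repn_alt part rtype partrc
instance (part : List Int) (rtype : String) (partrc : String) (out : List Int × List Int) : Decidable (Spec_springer_part2repn part rtype partrc out) := by unfold Spec_springer_part2repn; infer_instance

-- ===== CLAIM (what is proved, stated in full; the proofs are below) =====
def Claim_equal_springer_part2repn : Prop := ∀ (part : List Int) (rtype : String) (partrc : String), Dom_springer_part2repn part rtype partrc → Spec_springer_part2repn part rtype partrc (springer_part2repn part rtype partrc)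

-- ===== LEMMAS AND PROOFS =====

-- index-subtraction of an enumerate, the shape both ports share
def pvSub (l : List Int) : List Int := (PySem.List.enumerate l).map (fun p => p.2 - p.1)

theorem pvSub_append (l : List Int) (d : Int) :
    pvSub (l ++ [d]) = pvSub l ++ [d - l.length] := by
  simp [pvSub, PySem.List.enumerate_append, PySem.List.enumerate_cons]

-- A's split loop body and B's fused loop body agree under the invariant
theorem pv_fused (l : List (Int × Int)) :
    ∀ pe po : List Int,
      l.foldl
        (fun (s : (List Int × List Int) × (Int × Int)) p =>
          let v := p.2 + p.1
          if PySem.Int.mod v 2 == 1 then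
            ((s.1.1 ++ [PySem.Int.floordiv v 2 - s.2.1], s.1.2), (s.2.1 + 1, s.2.2))
          else
            ((s.1.1, s.1.2 ++ [PySem.Int.floordiv v 2 - s.2.2]), (s.2.1, s.2.2 + 1)))
        ((pvSub po, pvSub pe), ((po.length : Int), (pe.length : Int)))
      =
      (let r := l.foldl
          (fun (s : List Int × List Int) p =>
            if PySem.Int.mod (p.2 + p.1) 2 == 1 then (s.1, s.2 ++ [PySem.Int.floordiv (p.2 + p.1) 2])
            else (s.1 ++ [PySem.Int.floordiv (p.2 + p.1) 2], s.2)) (pe, po)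
       ((pvSub r.2, pvSub r.1), ((r.2.length : Int), (r.1.length : Int)))) := by
  induction l with
  | nil => intro pe po; rfl
  | cons p t ih =>
    intro pe po
    by_cases h : (p.2 + p.1) % 2 = 1
    · simpa [h, pvSub_append] using ih pe (po ++ [PySem.Int.floordiv (p.2 + p.1) 2])
    · simpa [h, pvSub_append] using ih (pe ++ [PySem.Int.floordiv (p.2 + p.1) 2]) po

-- the two pad conditions are the same Bool
theorem pv_pad_eq (n : Nat) (rtype : String) :
    ((rtype == "C" && n % 2 == 1) || (rtype == "B" && n % 2 == 0) || (rtype == "D" && n % 2 == 1))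
    = (if rtype == "B" then n % 2 == 0
       else (n % 2 == 1 && (rtype == "C" || rtype == "D"))) := by
  have h2 : n % 2 = 0 ∨ n % 2 = 1 := Nat.mod_two_eq_zero_or_one n
  by_cases hB : rtype = "B"
  · subst hB; rcases h2 with h | h <;> simp [h]
  · have hB' : (rtype == "B") = false := by simp [hB]
    rcases h2 with h | h <;>
      cases hC : (rtype == "C") <;> cases hD : (rtype == "D") <;> simp [h, hB']

-- counting split:  #{x > i}  =  #{x > i+1} + #{x = i+1}
theorem pv_countP_split (l : List Int) (i : Int) :
    l.countP (fun x => decide (i < x)) = l.countP (fun x => decide (i + 1 < x)) + l.count (i + 1) := by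
  induction l with
  | nil => simp
  | cons a t ih =>
    simp only [List.countP_cons, List.count_cons, ih, beq_iff_eq, decide_eq_true_eq]
    split_ifs with h1 h2 h3 h4 h5 h6 <;> omega

-- the last element of a sorted list is its max
theorem pv_last_sorted_eq_max (pos : List Int) (h : pos ≠ []) :
    (PySem.List.sorted pos (fun x => x) false).getLast? = PySem.List.max? pos (fun x => x) := by
  have hne : PySem.List.sorted pos (fun x => x) false ≠ [] := by
    intro hc; exact h ((PySem.List.sorted_eq_nil_iff pos (fun x => x) false).1 hc)
  obtain ⟨m, hm⟩ : ∃ m, PySem.List.max? pos (fun x => x) = some m := by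
    rcases ho : PySem.List.max? pos (fun x => x) with _ | m
    · exact absurd ((PySem.List.max?_eq_none_iff pos (fun x => x)).1 ho) h
    · exact ⟨m, rfl⟩
  rw [hm, List.getLast?_eq_some_getLast hne]
  congr 1
  have hlen : 0 < (PySem.List.sorted pos (fun x => x) false).length := List.length_pos_iff.2 hne
  have hle1 : (PySem.List.sorted pos (fun x => x) false).getLast hne ≤ m :=
    PySem.List.max?_isMax hm _ ((PySem.List.mem_sorted _ _ _ _).1 (List.getLast_mem hne))
  have hmem : m ∈ PySem.List.sorted pos (fun x => x) false :=
    (PySem.List.mem_sorted _ _ _ _).2 (PySem.List.max?_mem hm)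
  obtain ⟨k, hk, hkm⟩ := List.getElem_of_mem hmem
  have hle2 : m ≤ (PySem.List.sorted pos (fun x => x) false).getLast hne := by
    rw [List.getLast_eq_getElem hne, ← hkm]
    exact PySem.List.sorted_id_getElem_mono (xs := pos) (by omega) (by omega)
  omega

-- B's countdown loop computes the counts #{x > i} (ascending in the result list)
theorem pv_conj_loop (pos : List Int) (cnt : PySem.Dict Int Int)
    (hcnt : ∀ v, cnt.getD v 0 = (List.count v pos : Int)) (n : Nat) (res : List Int) :
    (PySem.List.pyRange ((n : Int) - 1) (-1) (-1)).foldl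
      (fun (s : Int × List Int) i =>
        (s.1 + cnt.getD (i + 1) 0, s.2 ++ [s.1 + cnt.getD (i + 1) 0]))
      (((pos.countP (fun x => decide ((n : Int) < x)) : Nat) : Int), res)
    = (((pos.countP (fun x => decide ((0 : Int) < x)) : Nat) : Int),
       res ++ (PySem.List.pyRange ((n : Int) - 1) (-1) (-1)).map
         (fun i => ((pos.countP (fun x => decide (i < x)) : Nat) : Int))) := by
  induction n generalizing res with
  | zero =>
    rw [PySem.List.pyRange_neg_one_eq_nil (by norm_num)]
    simp
  | succ k ih =>
    rw [PySem.List.pyRange_neg_one_cons (by push_cast; omega)]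
    have hstep : ((pos.countP (fun x => decide ((k : Int) + 1 < x)) : Nat) : Int)
        + cnt.getD (((k : Int) + 1 - 1) + 1) 0
        = ((pos.countP (fun x => decide ((k : Int) < x)) : Nat) : Int) := by
      rw [show ((k : Int) + 1 - 1) + 1 = (k : Int) + 1 by ring, hcnt,
          pv_countP_split pos (k : Int)]
      push_cast; ring
    simp only [List.foldl_cons, List.map_cons]
    push_cast
    rw [hstep]
    have := ih (res ++ [((pos.countP (fun x => decide ((k : Int) < x)) : Nat) : Int)])
    push_cast at this ⊢
    rw [show (k : Int) + 1 - 1 - 1 = (k : Int) - 1 by ring]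
    rw [this]
    simp

-- the two conjugate computations return the same list up to order; in fact B's
-- equals A's tpart before A's final descending sort
theorem pv_conj_perm (part : List Int) : (pvPartTrans part).Perm (pvConjDesc part) := by
  unfold pvPartTrans pvConjDesc
  dsimp only
  set pos := part.filter (fun x => decide (0 < x)) with hpos
  set sp := PySem.List.sorted pos (fun x => x) false with hsp
  by_cases h : pos = []
  · simp [h, hsp, PySem.List.sorted]
  · have hne : sp ≠ [] := by
      intro hc; exact h ((PySem.List.sorted_eq_nil_iff pos (fun x => x) false).1 hc)
    have hlen : (sp.length == 0) = false := by
      simp [List.length_eq_zero_iff, hne]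
    rw [hlen]
    simp only [Bool.false_eq_true, if_false, List.isEmpty_iff, h]
    -- identify the two bounds
    obtain ⟨m, hm⟩ : ∃ m, PySem.List.max? pos (fun x => x) = some m := by
      rcases ho : PySem.List.max? pos (fun x => x) with _ | m
      · exact absurd ((PySem.List.max?_eq_none_iff pos (fun x => x)).1 ho) h
      · exact ⟨m, rfl⟩
    have hlast : (PySem.List.pyGet? sp (-1)).getD 0 = m := by
      rw [PySem.List.pyGet?_neg_one, hsp, pv_last_sorted_eq_max pos h, hm]; rfl
    rw [hlast, hm]
    simp only [Option.getD_some]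
    -- A's tpart as a map of counts over pos
    have hcnt : ∀ i : Int, sp.countP (fun x => decide (i < x)) = pos.countP (fun x => decide (i < x)) := by
      intro i
      exact (PySem.List.sorted_perm pos (fun x => x) false).countP_eq _
    have htpA : (PySem.List.pyRange 0 m 1).foldl
        (fun acc i => acc ++ [((sp.filter (fun x => decide (i < x))).length : Int)]) []
        = (PySem.List.pyRange 0 m 1).map
            (fun i => ((pos.countP (fun x => decide (i < x)) : Nat) : Int)) := by
      rw [PySem.List.foldl_append_singleton_eq_map]
      simp only [List.nil_append]
      refine List.map_congr_left ?_
      intro i _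
      rw [← List.countP_eq_length_filter, hcnt]
    -- B's loop
    have hm0 : pos.countP (fun x => decide (m < x)) = 0 := by
      rw [List.countP_eq_zero]
      intro x hx
      have := PySem.List.max?_isMax hm x hx
      simp; omega
    have hmnat : ∃ nn : Nat, m = (nn : Int) := by
      obtain ⟨x, hx1⟩ := List.exists_mem_of_ne_nil pos h
      have hx0 : 0 < x := by
        have := List.of_mem_filter (hpos ▸ hx1)
        simpa using this
      have := PySem.List.max?_isMax hm x hx1
      exact ⟨m.toNat, by simp at this ⊢; omega⟩
    obtain ⟨nn, rfl⟩ := hmnat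
    have hcnt' : ∀ v, (pos.foldl (fun (d : PySem.Dict Int Int) x => d.insert x (d.getD x 0 + 1)) PySem.Dict.empty).getD v 0 = (List.count v pos : Int) := by
      intro v
      rw [PySem.Dict.foldl_insert_getD_add_one_eq_counter]
      exact PySem.Dict.getD_counter pos v
    have hloop := pv_conj_loop pos _ hcnt' nn []
    rw [hm0] at hloop
    simp only [Nat.cast_zero] at hloop
    rw [hloop]
    rw [PySem.List.slice?_none_none_neg_one, Option.getD_some]
    rw [PySem.List.pyRange_neg_one_eq_reverse]
    rw [show (-1 : Int) + 1 = 0 by ring, show (nn : Int) - 1 + 1 = (nn : Int) by ring]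
    rw [htpA]
    simp only [List.map_reverse, List.reverse_reverse, List.nil_append]
    exact PySem.List.sorted_perm _ _ _

-- the fused main loop computes A's (tauL, tauR)
theorem pv_core (part3 : List Int) :
    (let pp := (PySem.List.enumerate part3).map (fun p => p.2 + p.1)
     let s := pp.foldl
       (fun (s : List Int × List Int) lam =>
         if PySem.Int.mod lam 2 == 1 then (s.1, s.2 ++ [PySem.Int.floordiv lam 2])
         else (s.1 ++ [PySem.Int.floordiv lam 2], s.2)) ([], [])
     ((PySem.List.enumerate s.2).map (fun p => p.2 - p.1),
      (PySem.List.enumerate s.1).map (fun p => p.2 - p.1)))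
    =
    (let s := (PySem.List.enumerate part3).foldl
       (fun (s : (List Int × List Int) × (Int × Int)) p =>
         let v := p.2 + p.1
         if PySem.Int.mod v 2 == 1 then
           ((s.1.1 ++ [PySem.Int.floordiv v 2 - s.2.1], s.1.2), (s.2.1 + 1, s.2.2))
         else
           ((s.1.1, s.1.2 ++ [PySem.Int.floordiv v 2 - s.2.2]), (s.2.1, s.2.2 + 1)))
       (([], []), (0, 0))
     (s.1.1, s.1.2)) := by
  have h := pv_fused (PySem.List.enumerate part3) [] []
  simp only [pvSub, PySem.List.enumerate_nil, List.map_nil, List.length_nil, Nat.cast_zero] at h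
  simp only [List.foldl_map]
  rw [h]

-- ===== VERDICT (by name: the statement is the Claim_ definition above) =====
theorem springer_part2repn_spec : Claim_equal_springer_part2repn := by
  intro part rtype partrc _
  unfold Spec_springer_part2repn springer_part2repn springer_part2repn_alt
  have hinj : Function.Injective (fun x : Int => x) := fun a b h => h
  -- the sorted lists agree
  have hperm : (if partrc == "c" then pvPartTrans part else part).Perm
      (if partrc == "c" then pvConjDesc part else part) := by
    by_cases h : partrc == "c"
    · simp only [h, if_true]; exact pv_conj_perm part
    · simp only [h, Bool.false_eq_true, if_false]
      exact List.Perm.refl _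
  have hsorted : PySem.List.sorted (if partrc == "c" then pvPartTrans part else part) (fun x => x) false
      = PySem.List.sorted (if partrc == "c" then pvConjDesc part else part) (fun x => x) false :=
    PySem.List.sorted_eq_sorted_of_perm _ _ _ hinj hperm
  simp only [hsorted]
  set part2 := PySem.List.sorted (if partrc == "c" then pvConjDesc part else part) (fun x => x) false
  rw [← pv_pad_eq part2.length rtype]
  by_cases hpad : ((rtype == "C" && part2.length % 2 == 1) || (rtype == "B" && part2.length % 2 == 0) ||
       (rtype == "D" && part2.length % 2 == 1))
  · simp only [hpad, if_true, PySem.List.insert_zero]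
    exact pv_core (0 :: part2)
  · simp only [Bool.not_eq_true] at hpad
    simp only [hpad, Bool.false_eq_true, if_false]
    exact pv_core part2
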